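-- pv_equiv track=rewrite | github.com/sweedy12/newRethinkingMuse | Clustering.py | remove_edges_from_dict
-- ===== SOURCE A (Python) =====
-- def remove_edges_from_dict(node_to_neighbors, edges_to_remove):
--     new_node_to_neighbors = {}
--     for node in node_to_neighbors:
--         new_node_to_neighbors[node] = set()
--         for neighbor in node_to_neighbors[node]:
--             if (node, neighbor) not in edges_to_remove:
--                 new_node_to_neighbors[node].add(neighbor)
--     return new_node_to_neighbors
-- ===== SOURCE B (Python) =====
-- def remove_edges_from_dict(node_to_neighbors, edges_to_remove):
--     result = {node: set(neighbors) for node, neighbors in node_to_neighbors.items()}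
--     for u, v in edges_to_remove:
--         if u in result:
--             result[u].discard(v)
--     return result
-- ===== Notes on version B (the rewrite author's own statement) =====
-- stated objective: alternative
-- what changed: A is filter-driven: for each node it loops over its neighbors and tests each (node, neighbor) pair against edges_to_remove before adding it; B is subtractive and edge-driven: it first copies every neighbor list into a set unconditionally, then iterates edges_to_remove once, discarding each removed neighbor from the already-built set of its source node.
import Mathlib
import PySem

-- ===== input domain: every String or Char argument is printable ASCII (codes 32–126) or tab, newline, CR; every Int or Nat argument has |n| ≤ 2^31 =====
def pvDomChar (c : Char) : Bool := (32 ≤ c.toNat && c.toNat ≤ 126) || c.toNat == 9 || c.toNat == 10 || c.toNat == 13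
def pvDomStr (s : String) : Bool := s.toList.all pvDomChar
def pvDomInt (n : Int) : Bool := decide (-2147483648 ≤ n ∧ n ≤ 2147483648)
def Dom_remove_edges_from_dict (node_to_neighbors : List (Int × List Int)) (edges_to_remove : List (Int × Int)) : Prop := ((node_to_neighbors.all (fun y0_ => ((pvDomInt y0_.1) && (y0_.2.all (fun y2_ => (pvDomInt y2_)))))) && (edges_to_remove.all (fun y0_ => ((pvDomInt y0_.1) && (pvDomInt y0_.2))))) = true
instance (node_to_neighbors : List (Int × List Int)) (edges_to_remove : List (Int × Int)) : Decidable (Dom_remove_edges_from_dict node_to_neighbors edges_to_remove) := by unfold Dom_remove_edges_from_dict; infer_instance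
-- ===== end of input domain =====

-- B is subtractive and edge-driven (copy every neighbor set first, then one discard per edge of
-- edges_to_remove), instead of A's filter-driven inner membership test per (node, neighbor) pair.

-- ===== PORT A =====
-- for node in node_to_neighbors: new[node] = set(); for neighbor in ...: if (node, neighbor) not in edges_to_remove: new[node].add(neighbor)
def remove_edges_from_dict (node_to_neighbors : List (Int × List Int)) (edges_to_remove : List (Int × Int)) : List (Int × List Int) :=
  (node_to_neighbors.foldl
    (fun (new_d : PySem.Dict Int (PySem.Set Int)) node_entry =>
      let new_d := new_d.insert node_entry.1 PySem.Set.empty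
      node_entry.2.foldl
        (fun new_d neighbor =>
          if (node_entry.1, neighbor) ∉ edges_to_remove then
            new_d.insert node_entry.1 (PySem.Set.add (new_d.getD node_entry.1 PySem.Set.empty) neighbor)
          else new_d)
        new_d)
    PySem.Dict.empty).items

-- ===== PORT B =====
-- result = {node: set(neighbors) ...}; for u, v in edges_to_remove: if u in result: result[u].discard(v)
def remove_edges_from_dict_alt (node_to_neighbors : List (Int × List Int)) (edges_to_remove : List (Int × Int)) : List (Int × List Int) :=
  let result : PySem.Dict Int (PySem.Set Int) :=
    node_to_neighbors.foldl
      (fun d p => d.insert p.1 (PySem.Set.ofList p.2)) PySem.Dict.empty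
  (edges_to_remove.foldl
    (fun d e =>
      if d.contains e.1 then
        d.insert e.1 (PySem.Set.discard (d.getD e.1 PySem.Set.empty) e.2)
      else d)
    result).items

-- ===== PRECONDITION & SPEC =====
def Spec_remove_edges_from_dict (node_to_neighbors : List (Int × List Int)) (edges_to_remove : List (Int × Int)) (out : List (Int × List Int)) : Prop := out = remove_edges_from_dict_alt node_to_neighbors edges_to_remove
instance (node_to_neighbors : List (Int × List Int)) (edges_to_remove : List (Int × Int)) (out : List (Int × List Int)) : Decidable (Spec_remove_edges_from_dict node_to_neighbors edges_to_remove out) := by unfold Spec_remove_edges_from_dict; infer_instance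

-- ===== CLAIM (what is proved, stated in full; the proofs are below) =====
def Claim_equal_remove_edges_from_dict : Prop := ∀ (node_to_neighbors : List (Int × List Int)) (edges_to_remove : List (Int × Int)), Dom_remove_edges_from_dict node_to_neighbors edges_to_remove → Spec_remove_edges_from_dict node_to_neighbors edges_to_remove (remove_edges_from_dict node_to_neighbors edges_to_remove)

-- ===== LEMMAS AND PROOFS =====

-- A's inner loop over one node's neighbors, rewritten as an insert of the folded set value.
theorem innerA_insert (er : List (Int × Int)) (u : Int) (l : List Int)
    (d : PySem.Dict Int (PySem.Set Int)) (s : PySem.Set Int) :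
    l.foldl
      (fun new_d neighbor =>
        if (u, neighbor) ∉ er then
          new_d.insert u (PySem.Set.add (new_d.getD u PySem.Set.empty) neighbor)
        else new_d)
      (d.insert u s)
    = d.insert u
        (l.foldl (fun s neighbor => if (u, neighbor) ∉ er then PySem.Set.add s neighbor else s) s) := by
  induction l generalizing s with
  | nil => rfl
  | cons x xs ih =>
    simp only [List.foldl_cons]
    by_cases h : (u, x) ∉ er
    · simp only [h, PySem.Dict.getD_insert_self, PySem.Dict.insert_insert_self]
      exact ih _
    · simp only [h, ite_false]
      exact ih _

-- skipping removed neighbors while building the set is folding add over the kept neighbors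
theorem foldA_filter (p : Int → Bool) (l : List Int) (s : PySem.Set Int) :
    l.foldl (fun s x => if p x then PySem.Set.add s x else s) s
    = (l.filter p).foldl PySem.Set.add s := by
  induction l generalizing s with
  | nil => rfl
  | cons x xs ih =>
    by_cases h : p x = true
    · simp [h, ih]
    · simp [h, ih]

-- first-occurrence dedup commutes with filtering
theorem foldl_add_filter (q : Int → Bool) (l : List Int) (s : PySem.Set Int) :
    (l.filter q).foldl PySem.Set.add (s.filter q)
    = (l.foldl PySem.Set.add s).filter q := by
  induction l generalizing s with
  | nil => rfl
  | cons x xs ih =>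
    simp only [List.filter_cons, List.foldl_cons]
    by_cases hq : q x = true
    · rw [if_pos hq]
      simp only [List.foldl_cons]
      have hmem : x ∈ s.filter q ↔ x ∈ s := by simp [List.mem_filter, hq]
      by_cases hs : x ∈ s
      · rw [PySem.Set.add_of_mem hs, PySem.Set.add_of_mem (hmem.mpr hs), ih]
      · have hfe : (s ++ [x]).filter q = s.filter q ++ [x] := by
          simp [List.filter_append, hq]
        rw [PySem.Set.add_of_not_mem hs, PySem.Set.add_of_not_mem (fun h => hs (hmem.mp h)),
          ← hfe, ih]
    · rw [if_neg hq]
      have hfi : (PySem.Set.add s x).filter q = s.filter q := by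
        by_cases hs : x ∈ s
        · rw [PySem.Set.add_of_mem hs]
        · rw [PySem.Set.add_of_not_mem hs]
          simp [List.filter_append, hq]
      rw [← ih (PySem.Set.add s x), hfi]

-- A's per-node inner fold from the empty set is a filter of the deduplicated neighbor list
theorem Aval (er : List (Int × Int)) (u : Int) (l : List Int) :
    l.foldl (fun s neighbor => if (u, neighbor) ∉ er then PySem.Set.add s neighbor else s)
      PySem.Set.empty
    = (PySem.Set.ofList l).filter (fun v => decide ((u, v) ∉ er)) := by
  have h1 : l.foldl (fun s neighbor => if (u, neighbor) ∉ er then PySem.Set.add s neighbor else s)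
      PySem.Set.empty
      = (l.filter (fun x => decide ((u, x) ∉ er))).foldl PySem.Set.add PySem.Set.empty := by
    rw [← foldA_filter]
    simp
  have h2 := foldl_add_filter (fun x => decide ((u, x) ∉ er)) l PySem.Set.empty
  simp only [PySem.Set.empty, List.filter_nil] at h2
  rw [h1]
  simp only [PySem.Set.empty]
  rw [h2]
  rfl

-- B's discard loop over the edges, characterised on the items list: each value gets filtered
-- by the removed pairs whose source is its key.
theorem bLoop_items (er : List (Int × Int)) (d : PySem.Dict Int (PySem.Set Int))
    (hnd : d.keys.Nodup) :
    (er.foldl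
      (fun d e =>
        if d.contains e.1 then
          d.insert e.1 (PySem.Set.discard (d.getD e.1 PySem.Set.empty) e.2)
        else d)
      d).items
    = d.items.map (fun p => (p.1, p.2.filter (fun v => decide ((p.1, v) ∉ er)))) := by
  induction er generalizing d with
  | nil => simp
  | cons e rest ih =>
    obtain ⟨a, b⟩ := e
    simp only [List.foldl_cons]
    by_cases hc : d.contains a = true
    · rw [if_pos hc]
      rw [ih _ (PySem.Dict.nodup_keys_insert _ _ _ hnd)]
      rw [PySem.Dict.items_insert_of_contains _ _ hc, List.map_map]
      apply List.map_congr_left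
      intro p hp
      by_cases hpa : p.1 = a
      · have hgd : d.getD a PySem.Set.empty = p.2 := by
          have := PySem.Dict.getD_of_mem_items d (k := p.1) (v := p.2)
            (by simpa using hp) hnd PySem.Set.empty
          rw [hpa] at this; exact this
        simp only [Function.comp, hpa, beq_self_eq_true, if_pos, hgd]
        have : PySem.Set.discard p.2 b = p.2.filter (fun y => !(y == b)) := by
          simp [PySem.Set.discard]
        rw [this, List.filter_filter]
        refine congrArg _ (List.filter_congr ?_)
        intro v _
        by_cases hvb : v = b
        · simp [hvb]
        · simp [hvb, Prod.ext_iff]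
      · have : (p.1 == a) = false := by simp [hpa]
        simp only [Function.comp, this, Bool.false_eq_true, if_false]
        refine congrArg _ (List.filter_congr ?_)
        intro v _
        simp [List.mem_cons, Prod.ext_iff, hpa]
    · rw [if_neg hc]
      rw [ih _ hnd]
      apply List.map_congr_left
      intro p hp
      have hpa : p.1 ≠ a := by
        intro h
        apply hc
        rw [PySem.Dict.contains_iff_mem_keys, ← h]
        exact PySem.Dict.mem_keys_of_mem_items _ hp
      refine congrArg _ (List.filter_congr ?_)
      intro v _
      simp [List.mem_cons, Prod.ext_iff, hpa]

-- mapping a per-key transformation over the items commutes with the key-insert loop over nodes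
theorem items_map_comm (m : Int → PySem.Set Int → PySem.Set Int)
    (nn : List (Int × List Int)) (d d' : PySem.Dict Int (PySem.Set Int))
    (h : d'.items = d.items.map (fun q => (q.1, m q.1 q.2))) :
    (nn.foldl (fun d p => d.insert p.1 (m p.1 (PySem.Set.ofList p.2))) d').items
    = (nn.foldl (fun d p => d.insert p.1 (PySem.Set.ofList p.2)) d).items.map
        (fun q => (q.1, m q.1 q.2)) := by
  induction nn generalizing d d' with
  | nil => exact h
  | cons p ps ih =>
    simp only [List.foldl_cons]
    apply ih
    have hk : d'.keys = d.keys := by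
      simp only [PySem.Dict.keys, h, List.map_map]
      rfl
    by_cases hc : d.contains p.1 = true
    · have hc' : d'.contains p.1 = true := by
        rw [PySem.Dict.contains_iff_mem_keys, hk, ← PySem.Dict.contains_iff_mem_keys]
        exact hc
      rw [PySem.Dict.items_insert_of_contains _ _ hc',
        PySem.Dict.items_insert_of_contains _ _ hc, h, List.map_map, List.map_map]
      apply List.map_congr_left
      intro q _
      by_cases hq : q.1 = p.1
      · simp [Function.comp, hq]
      · have : (q.1 == p.1) = false := by simp [hq]
        simp [Function.comp, this]
    · have hc' : d'.contains p.1 = false := by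
        rw [Bool.eq_false_iff]
        intro habs
        rw [PySem.Dict.contains_iff_mem_keys, hk, ← PySem.Dict.contains_iff_mem_keys] at habs
        rw [habs] at hc
        exact hc rfl
      rw [PySem.Dict.items_insert_of_not_contains _ _ hc',
        PySem.Dict.items_insert_of_not_contains _ _ (Bool.eq_false_iff.mpr hc), h,
        List.map_append]
      rfl

-- ===== VERDICT (by name: the statement is the Claim_ definition above) =====
theorem remove_edges_from_dict_spec : Claim_equal_remove_edges_from_dict := by
  intro nn er _
  show remove_edges_from_dict nn er = remove_edges_from_dict_alt nn er
  simp only [remove_edges_from_dict, remove_edges_from_dict_alt]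
  have hnd : (nn.foldl (fun d p => d.insert p.1 (PySem.Set.ofList p.2))
      PySem.Dict.empty).keys.Nodup := by
    exact PySem.Dict.nodup_keys_foldl_insert_key nn Prod.fst
      (fun d p => PySem.Set.ofList p.2) PySem.Dict.empty PySem.Dict.nodup_keys_empty
  rw [bLoop_items er _ hnd,
    ← items_map_comm (fun u s => s.filter (fun v => decide ((u, v) ∉ er))) nn
      PySem.Dict.empty PySem.Dict.empty rfl]
  congr 1
  congr 1
  funext d p
  rw [innerA_insert, Aval]
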